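-- pv_equiv track=rewrite | github.com/didikid3/PasswordApplication_Python | homepage.py | getDataLists
-- ===== SOURCE A (Python) =====
-- def getDataLists(data):
--     application = []
--     usernames = []
--     passwords = []
--     count = 0
--     for line in data:
--         if count == 0:
--             application.append(line.strip())
--             count += 1
--         elif count == 1:
--             usernames.append(line.strip())
--             count += 1
--         else:
--             passwords.append(line.strip())
--             count = 0
--
--     return application,usernames,passwords
-- ===== SOURCE B (Python) =====
-- def getDataLists(data):
--     lines = [line.strip() for line in data]
--     return lines[0::3], lines[1::3], lines[2::3]
-- ===== Notes on version B (the rewrite author's own statement) =====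
-- stated objective: idiomatic
-- what changed: Replaced the count-mod-3 state machine with one strip pass followed by three strided slices lines[0::3], lines[1::3], lines[2::3].
import Mathlib
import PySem

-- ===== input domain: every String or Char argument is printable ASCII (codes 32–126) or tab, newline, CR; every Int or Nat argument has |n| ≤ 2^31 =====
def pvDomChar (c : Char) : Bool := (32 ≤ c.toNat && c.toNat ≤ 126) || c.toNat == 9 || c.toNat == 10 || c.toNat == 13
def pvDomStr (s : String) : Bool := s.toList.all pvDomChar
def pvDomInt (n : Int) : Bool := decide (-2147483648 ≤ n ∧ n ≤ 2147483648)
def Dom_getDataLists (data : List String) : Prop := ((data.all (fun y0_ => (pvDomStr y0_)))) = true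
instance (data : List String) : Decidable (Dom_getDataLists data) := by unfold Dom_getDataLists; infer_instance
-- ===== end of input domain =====

-- B replaces A's count-mod-3 dispatch loop by one strip pass and three strided slices (idiomatic; same cost).


-- ===== PORT A =====
-- loop body of A: dispatch on count (0 → application, 1 → usernames, else → passwords)
def stepA (st : List String × List String × List String × Int) (line : String) :
    List String × List String × List String × Int :=
  let (app, users, pwds, count) := st
  if count == 0 then (app ++ [PySem.Str.strip line], users, pwds, count + 1)
  else if count == 1 then (app, users ++ [PySem.Str.strip line], pwds, count + 1)
  else (app, users, pwds ++ [PySem.Str.strip line], 0)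

def getDataLists (data : List String) : List String × List String × List String :=
  let r := data.foldl stepA ([], [], [], 0)
  (r.1, r.2.1, r.2.2.1)

-- ===== PORT B =====
def getDataLists_alt (data : List String) : List String × List String × List String :=
  let lines := data.map PySem.Str.strip
  ((PySem.List.slice? lines (some 0) none 3).getD [],
   (PySem.List.slice? lines (some 1) none 3).getD [],
   (PySem.List.slice? lines (some 2) none 3).getD [])

-- ===== PRECONDITION & SPEC =====
def Spec_getDataLists (data : List String) (out : List String × List String × List String) : Prop := out = getDataLists_alt data
instance (data : List String) (out : List String × List String × List String) : Decidable (Spec_getDataLists data out) := by unfold Spec_getDataLists; infer_instance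

-- ===== CLAIM (what is proved, stated in full; the proofs are below) =====
def Claim_equal_getDataLists : Prop := ∀ (data : List String), Dom_getDataLists data → Spec_getDataLists data (getDataLists data)

-- ===== LEMMAS AND PROOFS =====

-- every third element of a list, starting at its head
def everyThird {α : Type} : List α → List α
  | [] => []
  | [a] => [a]
  | [a, _] => [a]
  | a :: _ :: _ :: t => a :: everyThird t

theorem everyThird_cons {α : Type} (a : α) (t : List α) :
    everyThird (a :: t) = a :: everyThird (t.drop 2) := by
  match t with
  | [] => simp [everyThird]
  | [_] => simp [everyThird]
  | _ :: _ :: _ => simp [everyThird]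

-- A's loop, started at count c ∈ {0,1,2}, fills the three lists with the three strides
theorem foldA_inv (l : List String) : ∀ (a u p : List String),
    (List.foldl stepA (a, u, p, 0) l =
      (a ++ everyThird (l.map PySem.Str.strip),
       u ++ everyThird ((l.map PySem.Str.strip).drop 1),
       p ++ everyThird ((l.map PySem.Str.strip).drop 2),
       ((l.length % 3 : Nat) : Int))) ∧
    (List.foldl stepA (a, u, p, 1) l =
      (a ++ everyThird ((l.map PySem.Str.strip).drop 2),
       u ++ everyThird (l.map PySem.Str.strip),
       p ++ everyThird ((l.map PySem.Str.strip).drop 1),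
       (((1 + l.length) % 3 : Nat) : Int))) ∧
    (List.foldl stepA (a, u, p, 2) l =
      (a ++ everyThird ((l.map PySem.Str.strip).drop 1),
       u ++ everyThird ((l.map PySem.Str.strip).drop 2),
       p ++ everyThird (l.map PySem.Str.strip),
       (((2 + l.length) % 3 : Nat) : Int))) := by
  induction l with
  | nil => intro a u p; simp [everyThird]
  | cons x t ih =>
    intro a u p
    refine ⟨?_, ?_, ?_⟩
    · have h := (ih (a ++ [PySem.Str.strip x]) u p).2.1
      simp only [List.foldl_cons, stepA]
      norm_num
      rw [h]
      simp [everyThird_cons, List.append_assoc]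
      omega
    · have h := (ih a (u ++ [PySem.Str.strip x]) p).2.2
      simp only [List.foldl_cons, stepA]
      norm_num
      rw [h]
      simp [everyThird_cons, List.append_assoc]
      omega
    · have h := (ih a u (p ++ [PySem.Str.strip x])).1
      simp only [List.foldl_cons, stepA]
      norm_num
      rw [h]
      simp [everyThird_cons, List.append_assoc]
      omega

def cnt (n s : Nat) : Nat := if s < n then (n - s + 2) / 3 else 0

def G {α : Type} (l : List α) (s : Nat) : List α :=
  (List.range (cnt l.length s)).filterMap (fun k => l[s + 3 * k]?)

theorem G_eq {α : Type} (l : List α) : ∀ (d s : Nat), l.length - s ≤ d →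
    G l s = everyThird (l.drop s) := by
  intro d
  induction d with
  | zero =>
    intro s hs
    have h : l.length ≤ s := by omega
    simp [G, cnt, Nat.not_lt.mpr h, List.drop_of_length_le h, everyThird]
  | succ d ih =>
    intro s hs
    by_cases h : s < l.length
    · have hc : cnt l.length s = cnt l.length (s + 3) + 1 := by unfold cnt; split_ifs <;> omega
      have hdrop : l.drop s = l[s] :: l.drop (s + 1) := (List.getElem_cons_drop h).symm
      rw [hdrop, everyThird_cons]
      have h2 : (l.drop (s + 1)).drop 2 = l.drop (s + 3) := by
        rw [List.drop_drop]
      rw [h2, ← ih (s + 3) (by omega)]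
      unfold G
      rw [hc, List.range_succ_eq_map, List.filterMap_cons, List.filterMap_map]
      simp only [Nat.mul_zero, Nat.add_zero, List.getElem?_eq_getElem h]
      congr 1
      apply List.filterMap_congr
      intro k _
      simp only [Function.comp]
      congr 1
      omega
    · have hle : l.length ≤ s := by omega
      simp [G, cnt, Nat.not_lt.mpr hle, List.drop_of_length_le hle, everyThird]

theorem slice3_eq_G {α : Type} (l : List α) (j : Nat) :
    PySem.List.slice? l (some (j : Int)) none 3 = some (G l (min j l.length)) := by
  have hj : ¬ ((j : Int) < 0) := by omega
  simp only [PySem.List.slice?, PySem.List.sliceIndices]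
  norm_num [if_neg hj]
  unfold G cnt
  have hcnt : (((l.length : Int) - min (j : Int) (l.length : Int) + 3 - 1) / 3).toNat
      = (l.length - min j l.length + 2) / 3 := by omega
  split_ifs with h1 h2 <;>
    first
      | (exfalso; omega)
      | simp
      | (rw [hcnt]; apply List.filterMap_congr; intro k _; congr 1; omega)

-- the B-side slice with step 3 is exactly everyThird of the dropped list
theorem slice3_eq_everyThird {α : Type} (l : List α) (j : Nat) :
    PySem.List.slice? l (some (j : Int)) none 3 = some (everyThird (l.drop j)) := by
  rw [slice3_eq_G]
  congr 1
  rw [G_eq l l.length (min j l.length) (by omega)]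
  by_cases h : j ≤ l.length
  · rw [Nat.min_eq_left h]
  · rw [Nat.min_eq_right (by omega), List.drop_of_length_le (Nat.le_refl _),
        List.drop_of_length_le (by omega)]

theorem getDataLists_spec : Claim_equal_getDataLists := by
  intro data _
  unfold Spec_getDataLists getDataLists getDataLists_alt
  have h := (foldA_inv data [] [] []).1
  rw [h]
  have h0 := slice3_eq_everyThird (data.map PySem.Str.strip) 0
  have h1 := slice3_eq_everyThird (data.map PySem.Str.strip) 1
  have h2 := slice3_eq_everyThird (data.map PySem.Str.strip) 2
  norm_num at h0 h1 h2
  simp [h0, h1, h2]
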